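-- pv_equiv track=rewrite | github.com/Chemokoren/Algorithms-1 | GFG/Arrays/Matrix/find_unique_elements_in_a_matrix.py | my_tests
-- ===== SOURCE A (Python) =====
-- def my_tests(mat):
--     dic =dict()
--     res =[]
--     for i in range(len(mat)):
--         for j in range(len(mat[0])):
--             dic[mat[i][j]] =dic.get(mat[i][j],0) +1
--
--     for k, v in dic.items():
--         if v == 1:
--             res.append(k)
--
--     return res
-- ===== SOURCE B (Python) =====
-- def my_tests(mat):
--     once = []    # values seen exactly once so far, in first-occurrence order
--     more = set() # values seen at least twice
--     for i in range(len(mat)):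
--         for j in range(len(mat[0])):
--             x = mat[i][j]
--             if x in more:
--                 pass
--             elif x in once:
--                 once.remove(x)
--                 more.add(x)
--             else:
--                 once.append(x)
--     return once
-- ===== Notes on version B (the rewrite author's own statement) =====
-- stated objective: alternative
-- what changed: B makes a single streaming pass keeping an ordered candidate list of values seen exactly once and a kill-set of values seen twice, evicting a candidate on its second occurrence, instead of A's two-stage count-dictionary-then-filter.
import Mathlib
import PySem

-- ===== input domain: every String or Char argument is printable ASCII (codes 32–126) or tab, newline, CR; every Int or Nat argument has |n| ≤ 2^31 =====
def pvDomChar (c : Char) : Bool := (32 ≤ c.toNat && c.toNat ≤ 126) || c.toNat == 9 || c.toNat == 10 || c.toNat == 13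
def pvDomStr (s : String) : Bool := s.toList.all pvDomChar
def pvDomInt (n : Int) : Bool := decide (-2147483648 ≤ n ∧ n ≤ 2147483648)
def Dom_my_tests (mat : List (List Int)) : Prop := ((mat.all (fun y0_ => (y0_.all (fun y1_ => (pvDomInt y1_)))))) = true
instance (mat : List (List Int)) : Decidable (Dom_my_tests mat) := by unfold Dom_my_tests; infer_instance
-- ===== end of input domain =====

-- B replaces A's count-dictionary pass with a single streaming pass that keeps an ordered once-candidate list and a twice-seen kill set (alternative algorithm; no speed claim).


-- ===== PORT A =====
def my_tests (mat : List (List Int)) : List Int :=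
  let dic : PySem.Dict Int Int :=
    (PySem.List.pyRange 0 mat.length 1).foldl (fun dic i =>
      (PySem.List.pyRange 0 (((PySem.List.pyGet? mat 0).getD []).length : Int) 1).foldl (fun dic j =>
        let v := (PySem.List.pyGet? ((PySem.List.pyGet? mat i).getD []) j).getD 0
        dic.insert v (dic.getD v 0 + 1)) dic) PySem.Dict.empty
  let res : List Int :=
    dic.items.foldl (fun res kv => if kv.2 == 1 then res ++ [kv.1] else res) []
  res

-- ===== PORT B =====
-- B-side helper: the loop body of Source B (state = (once, more))
def pvStepB (st : List Int × PySem.Set Int) (x : Int) : List Int × PySem.Set Int :=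
  if PySem.Set.contains st.2 x then st
  else if st.1.contains x then ((PySem.List.remove? st.1 x).getD st.1, PySem.Set.add st.2 x)
  else (st.1 ++ [x], st.2)

def my_tests_alt (mat : List (List Int)) : List Int :=
  let st : List Int × PySem.Set Int :=
    (PySem.List.pyRange 0 mat.length 1).foldl (fun st i =>
      (PySem.List.pyRange 0 (((PySem.List.pyGet? mat 0).getD []).length : Int) 1).foldl (fun st j =>
        pvStepB st ((PySem.List.pyGet? ((PySem.List.pyGet? mat i).getD []) j).getD 0)) st)
      ([], PySem.Set.empty)
  st.1

-- ===== PRECONDITION & SPEC =====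
-- Pre_ excludes exactly the ragged matrices on which both Pythons raise IndexError:
-- every row must have at least len(mat[0]) elements (columns beyond that are ignored by both).
def Pre_my_tests (mat : List (List Int)) : Prop :=
  ∀ row ∈ mat, (mat.headD []).length ≤ row.length
instance (mat : List (List Int)) : Decidable (Pre_my_tests mat) := by unfold Pre_my_tests; infer_instance

def pvWitness_my_tests : List (List Int) := [[1, 2], [2, 3]]

def Spec_my_tests (mat : List (List Int)) (out : List Int) : Prop := out = my_tests_alt mat
instance (mat : List (List Int)) (out : List Int) : Decidable (Spec_my_tests mat out) := by unfold Spec_my_tests; infer_instance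

-- ===== CLAIM (what is proved, stated in full; the proofs are below) =====
def Claim_equal_my_tests : Prop := ∀ (mat : List (List Int)), Dom_my_tests mat → Pre_my_tests mat → Spec_my_tests mat (my_tests mat)

-- ===== LEMMAS AND PROOFS =====

-- a fold over a flatMap is the nested fold (general List fact; not found under a library name)
theorem pvFoldlFlatMap {α β γ : Type} (l : List α) (g : α → List β) (f : γ → β → γ) (init : γ) :
    (l.flatMap g).foldl f init = l.foldl (fun a x => (g x).foldl f a) init := by
  induction l generalizing init with
  | nil => rfl
  | cons x t ih => simp [List.flatMap_cons, List.foldl_append, ih]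

-- set(xs) (first occurrences in order) is a sublist of xs
theorem pvOfListSublist (l : List Int) : List.Sublist (PySem.Set.ofList l) l := by
  induction l using List.reverseRecOn with
  | nil => simp [PySem.Set.ofList_nil]
  | append_singleton t x ih =>
      rw [PySem.Set.ofList_append_singleton]
      unfold PySem.Set.add
      split
      · exact ih.trans (List.sublist_append_left t [x])
      · exact ih.append (List.Sublist.refl [x])

-- the elements occurring exactly once each occur once in the filtered list, so it is Nodup
theorem pvFilterNodup (l : List Int) : (l.filter (fun x => l.count x == 1)).Nodup := by
  rw [List.nodup_iff_count_le_one]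
  intro a
  by_cases h : l.count a == 1
  · have hle : List.count a (l.filter (fun x => l.count x == 1)) ≤ List.count a l :=
      (List.filter_sublist (l := l)).count_le a
    simp only [beq_iff_eq] at h
    omega
  · have : a ∉ l.filter (fun x => l.count x == 1) := by
      simp only [List.mem_filter]
      tauto
    rw [List.count_eq_zero.mpr this]
    omega

-- filtering the deduplicated list by "occurs exactly once" gives the same list as filtering the original
theorem pvKey (l : List Int) :
    (PySem.Set.ofList l).filter (fun x => l.count x == 1) = l.filter (fun x => l.count x == 1) := by
  have hsub := (pvOfListSublist l).filter (fun x => l.count x == 1)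
  have hnd2 := pvFilterNodup l
  have hmem : ∀ a, a ∈ (PySem.Set.ofList l).filter (fun x => l.count x == 1) ↔
      a ∈ l.filter (fun x => l.count x == 1) := by
    intro a
    simp [List.mem_filter, PySem.Set.mem_ofList]
  have hperm : List.Perm ((PySem.Set.ofList l).filter (fun x => l.count x == 1))
      (l.filter (fun x => l.count x == 1)) :=
    (List.perm_ext_iff_of_nodup ((PySem.Set.nodup_ofList l).filter _) hnd2).mpr hmem
  exact hsub.eq_of_length hperm.length_eq

-- A's whole body, expressed over the flattened element list
theorem pvMainA (flat : List Int) :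
    ((flat.foldl (fun d x => d.insert x (d.getD x 0 + 1)) (PySem.Dict.empty : PySem.Dict Int Int)).items).foldl
      (fun res kv => if kv.2 == 1 then res ++ [kv.1] else res) ([] : List Int)
    = flat.filter (fun x => flat.count x == 1) := by
  rw [PySem.Dict.foldl_insert_getD_add_one_eq_counter,
    PySem.List.foldl_append_if (p := fun kv : Int × Int => kv.2 == 1) (f := fun kv => kv.1),
    PySem.Dict.items_counter, List.filter_map, List.map_map]
  have hcast : ∀ k ∈ PySem.Set.ofList flat,
      ((fun kv : Int × Int => kv.2 == 1) ∘ fun k => (k, (List.count k flat : Int))) k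
      = (flat.count k == 1) := by
    intro k _
    simp [Function.comp]
  rw [List.filter_congr hcast]
  simp only [List.nil_append, Function.comp_def, List.map_id_fun', id_eq]
  simpa using pvKey flat

-- Set.contains in terms of membership, and over Set.add
theorem pvContainsSet (s : PySem.Set Int) (x : Int) : PySem.Set.contains s x = decide (x ∈ s) := by
  simp [PySem.Set.contains]

theorem pvContainsAdd (s : PySem.Set Int) (v x : Int) :
    PySem.Set.contains (PySem.Set.add s v) x = (PySem.Set.contains s x || decide (x = v)) := by
  rw [pvContainsSet, pvContainsSet]
  by_cases h : x ∈ s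
  · simp [PySem.Set.mem_add, h]
  · by_cases hxv : x = v <;> simp [PySem.Set.mem_add, h, hxv]

-- B's streaming invariant: after processing prefix p, once = elements occurring exactly
-- once in p (in order) and the kill set holds exactly the elements occurring ≥ 2 times.
theorem pvInvB (p : List Int) :
    (p.foldl pvStepB (([] : List Int), (PySem.Set.empty : PySem.Set Int))).1
        = p.filter (fun x => p.count x == 1)
    ∧ ∀ x : Int, PySem.Set.contains (p.foldl pvStepB ([], PySem.Set.empty)).2 x
        = decide (2 ≤ p.count x) := by
  induction p using List.reverseRecOn with
  | nil => constructor <;> simp [PySem.Set.empty, PySem.Set.contains]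
  | append_singleton p a ih =>
      obtain ⟨ih1, ih2⟩ := ih
      rw [List.foldl_append] at *
      simp only [List.foldl_cons, List.foldl_nil]
      set st := p.foldl pvStepB (([] : List Int), (PySem.Set.empty : PySem.Set Int)) with hst
      have hcnt : ∀ x : Int, (p ++ [a]).count x = p.count x + if x = a then 1 else 0 := by
        intro x
        rw [List.count_append]
        rcases eq_or_ne x a with hxa | hxa
        · rw [hxa, if_pos rfl]; simp
        · rw [if_neg hxa]
          have : List.count x [a] = 0 := List.count_eq_zero.mpr (by simp [hxa])
          omega
      have hmemo : ∀ x : Int, st.1.contains x = decide (p.count x = 1) := by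
        intro x
        rw [ih1]
        by_cases hx : p.count x = 1
        · have : x ∈ p := List.count_pos_iff.mp (by omega)
          simp [List.mem_filter, this, hx]
        · simp [List.mem_filter, hx]
      unfold pvStepB
      by_cases h2 : 2 ≤ p.count a
      · -- a was already seen at least twice: state unchanged
        rw [ih2 a]
        simp only [h2, decide_true, if_true]
        constructor
        · rw [ih1, List.filter_append]
          have hpred : ∀ x ∈ p, (p.count x == 1) = ((p ++ [a]).count x == 1) := by
            intro x _
            rw [hcnt x]
            rcases eq_or_ne x a with hxa | hxa
            · rw [hxa, if_pos rfl]
              rw [show (List.count a p + 1 == 1) = false from beq_eq_false_iff_ne.mpr (by omega),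
                show (List.count a p == 1) = false from beq_eq_false_iff_ne.mpr (by omega)]
            · rw [if_neg hxa, Nat.add_zero]
          rw [List.filter_congr hpred, List.filter_singleton,
            beq_eq_false_iff_ne.mpr (by rw [hcnt a, if_pos rfl]; omega),
            Bool.cond_false, List.append_nil]
        · intro x
          rw [ih2 x, hcnt x, decide_eq_decide]
          rcases eq_or_ne x a with hxa | hxa
          · rw [hxa, if_pos rfl]; omega
          · rw [if_neg hxa, Nat.add_zero]
      · rw [ih2 a]
        simp only [(by simpa using h2 : ¬ (2 ≤ p.count a)), decide_false, if_false,
          Bool.false_eq_true]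
        by_cases h1 : p.count a = 1
        · -- second occurrence of a: evict it from once, add it to the kill set
          rw [hmemo a]
          simp only [h1, decide_true, if_true]
          have hmem : a ∈ st.1 := by
            have : a ∈ p := List.count_pos_iff.mp (by omega)
            rw [ih1]; simp [List.mem_filter, this, h1]
          rw [PySem.List.remove?_eq_some_erase st.1 a hmem, Option.getD_some]
          constructor
          · have hnd : st.1.Nodup := by rw [ih1]; exact pvFilterNodup p
            rw [hnd.erase_eq_filter, ih1, List.filter_filter]
            have hpred : ∀ x ∈ p,
                ((x != a) && (p.count x == 1)) = ((p ++ [a]).count x == 1) := by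
              intro x _
              rw [hcnt x]
              rcases eq_or_ne x a with hxa | hxa
              · rw [hxa, if_pos rfl]; simp [h1]
              · rw [if_neg hxa, Nat.add_zero]; simp [hxa]
            rw [List.filter_congr hpred, List.filter_append, List.filter_singleton,
              beq_eq_false_iff_ne.mpr (by rw [hcnt a, if_pos rfl]; omega),
              Bool.cond_false, List.append_nil]
          · intro x
            rw [pvContainsAdd, ih2 x, hcnt x]
            rcases eq_or_ne x a with hxa | hxa
            · rw [hxa, if_pos rfl]; simp [h1]
            · rw [if_neg hxa, Nat.add_zero]; simp [hxa]
        · -- first occurrence of a: append it to once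
          have h0 : p.count a = 0 := by omega
          rw [hmemo a]
          simp only [h1, decide_false, if_false, Bool.false_eq_true]
          constructor
          · rw [ih1, List.filter_append]
            have hpred : ∀ x ∈ p, (p.count x == 1) = ((p ++ [a]).count x == 1) := by
              intro x hx
              rw [hcnt x]
              rcases eq_or_ne x a with hxa | hxa
              · exact absurd (List.count_pos_iff.mpr (hxa ▸ hx)) (by omega)
              · rw [if_neg hxa, Nat.add_zero]
            rw [List.filter_congr hpred, List.filter_singleton,
              show (List.count a (p ++ [a]) == 1) = true by rw [hcnt a, if_pos rfl, h0]; rfl,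
              Bool.cond_true]
          · intro x
            rw [ih2 x, hcnt x]
            rcases eq_or_ne x a with hxa | hxa
            · rw [hxa, if_pos rfl]; simp [h0]
            · rw [if_neg hxa, Nat.add_zero]

-- ===== VERDICT (by name: the statement is the Claim_ definition above) =====
theorem my_tests_spec : Claim_equal_my_tests := by
  intro mat _ _
  simp only [Spec_my_tests, my_tests, my_tests_alt]
  have hA := pvFoldlFlatMap (l := PySem.List.pyRange 0 mat.length 1)
    (g := fun i => (PySem.List.pyRange 0 (((PySem.List.pyGet? mat 0).getD []).length : Int) 1).map
      (fun j => (PySem.List.pyGet? ((PySem.List.pyGet? mat i).getD []) j).getD 0))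
    (f := fun (d : PySem.Dict Int Int) x => d.insert x (d.getD x 0 + 1))
    (init := PySem.Dict.empty)
  have hB := pvFoldlFlatMap (l := PySem.List.pyRange 0 mat.length 1)
    (g := fun i => (PySem.List.pyRange 0 (((PySem.List.pyGet? mat 0).getD []).length : Int) 1).map
      (fun j => (PySem.List.pyGet? ((PySem.List.pyGet? mat i).getD []) j).getD 0))
    (f := pvStepB) (init := (([] : List Int), (PySem.Set.empty : PySem.Set Int)))
  simp only [List.foldl_map] at hA hB
  rw [← hA, ← hB, pvMainA, (pvInvB _).1]
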